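-- pv_equiv track=rewrite | github.com/rok-web/ai-fashion-stylist-pro | wardrobe_intelligence.py | _calculate_outfit_potential
-- ===== SOURCE A (Python) =====
-- def _calculate_outfit_potential(gap, owned_items):
--     """
--     Calculate how many new outfit combinations this item would unlock
--     Simple heuristic: multiply compatible items across categories
--     """
--     gap_category = gap.get('category', '').rstrip('s')
--
--     if not gap_category:
--         return 5  # Default estimate
--
--     # Count items in complementary categories
--     if gap_category == 'top':
--         bottoms = len([i for i in owned_items if i.get('category') == 'bottom'])
--         footwear = len([i for i in owned_items if i.get('category') == 'footwear'])
--         return max(bottoms * footwear, 5)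
--
--     elif gap_category == 'bottom':
--         tops = len([i for i in owned_items if i.get('category') == 'top'])
--         footwear = len([i for i in owned_items if i.get('category') == 'footwear'])
--         return max(tops * footwear, 5)
--
--     elif gap_category == 'footwear':
--         tops = len([i for i in owned_items if i.get('category') == 'top'])
--         bottoms = len([i for i in owned_items if i.get('category') == 'bottom'])
--         return max(tops * bottoms, 5)
--
--     elif gap_category == 'outerwear':
--         tops = len([i for i in owned_items if i.get('category') == 'top'])
--         return max(tops * 2, 5)
--
--     return 5
-- ===== SOURCE B (Python) =====
-- def _calculate_outfit_potential(gap, owned_items):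
--     """One counting pass over owned_items, then a dispatch table (same values as A)."""
--     cat = gap.get('category', '').rstrip('s')
--     counts = {}
--     for i in owned_items:
--         c = i.get('category')
--         counts[c] = counts.get(c, 0) + 1
--     t = counts.get('top', 0)
--     b = counts.get('bottom', 0)
--     f = counts.get('footwear', 0)
--     table = {'top': b * f, 'bottom': t * f, 'footwear': t * b, 'outerwear': t * 2}
--     return max(table.get(cat, 5), 5) if cat else 5
-- ===== Notes on version B (the rewrite author's own statement) =====
-- stated objective: simpler
-- what changed: Replaces A's per-branch list-comprehension scans (two scans inside each category branch) with a single counting pass over owned_items followed by a dispatch-table lookup keyed by the stripped gap category.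
import Mathlib
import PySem

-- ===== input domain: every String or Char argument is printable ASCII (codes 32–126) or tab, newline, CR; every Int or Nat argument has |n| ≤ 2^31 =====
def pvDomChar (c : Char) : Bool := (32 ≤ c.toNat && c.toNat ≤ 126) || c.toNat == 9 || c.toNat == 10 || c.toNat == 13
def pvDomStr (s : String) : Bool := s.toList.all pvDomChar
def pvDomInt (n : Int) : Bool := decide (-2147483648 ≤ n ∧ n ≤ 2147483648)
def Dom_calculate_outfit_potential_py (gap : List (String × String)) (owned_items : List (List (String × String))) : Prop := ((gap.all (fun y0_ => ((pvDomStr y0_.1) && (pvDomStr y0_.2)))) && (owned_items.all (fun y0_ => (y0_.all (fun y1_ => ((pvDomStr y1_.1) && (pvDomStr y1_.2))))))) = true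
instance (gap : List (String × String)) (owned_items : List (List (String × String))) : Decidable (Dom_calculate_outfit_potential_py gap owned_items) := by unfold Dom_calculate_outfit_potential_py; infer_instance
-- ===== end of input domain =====

-- B replaces A's per-branch list-comprehension scans with one counting pass and a dispatch table (objective: simpler, one traversal).
-- Note: A mutates nothing; the equivalence is about the return value.

-- s.rstrip('s'): drop every trailing 's' (exact: rstrip with an explicit char set {'s'})
def pyRstripS (s : String) : List Char :=
  (s.toList.reverse.dropWhile (fun c => c == 's')).reverse

-- i.get('category') (both Pythons evaluate exactly this on each item)
def pyCat (i : List (String × String)) : Option String :=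
  (PySem.Dict.ofList i).get? "category"

-- ===== PORT A =====
def calculate_outfit_potential_py (gap : List (String × String)) (owned_items : List (List (String × String))) : Int :=
  let gap_category := pyRstripS ((PySem.Dict.ofList gap).getD "category" "")
  if gap_category = [] then 5
  else if gap_category = "top".toList then
    let bottoms : Int := (owned_items.filter (fun i => pyCat i == some "bottom")).length
    let footwear : Int := (owned_items.filter (fun i => pyCat i == some "footwear")).length
    max (bottoms * footwear) 5
  else if gap_category = "bottom".toList then
    let tops : Int := (owned_items.filter (fun i => pyCat i == some "top")).length
    let footwear : Int := (owned_items.filter (fun i => pyCat i == some "footwear")).length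
    max (tops * footwear) 5
  else if gap_category = "footwear".toList then
    let tops : Int := (owned_items.filter (fun i => pyCat i == some "top")).length
    let bottoms : Int := (owned_items.filter (fun i => pyCat i == some "bottom")).length
    max (tops * bottoms) 5
  else if gap_category = "outerwear".toList then
    let tops : Int := (owned_items.filter (fun i => pyCat i == some "top")).length
    max (tops * 2) 5
  else 5

-- ===== PORT B =====
def calculate_outfit_potential_py_alt (gap : List (String × String)) (owned_items : List (List (String × String))) : Int :=
  let cat := pyRstripS ((PySem.Dict.ofList gap).getD "category" "")
  let counts : PySem.Dict (Option String) Int :=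
    owned_items.foldl (fun d i => d.insert (pyCat i) (d.getD (pyCat i) 0 + 1)) PySem.Dict.empty
  let t := counts.getD (some "top") 0
  let b := counts.getD (some "bottom") 0
  let f := counts.getD (some "footwear") 0
  let table : PySem.Dict (List Char) Int :=
    PySem.Dict.ofList [("top".toList, b * f), ("bottom".toList, t * f),
                       ("footwear".toList, t * b), ("outerwear".toList, t * 2)]
  if cat = [] then 5 else max (table.getD cat 5) 5

-- ===== PRECONDITION & SPEC =====
def Spec_calculate_outfit_potential_py (gap : List (String × String)) (owned_items : List (List (String × String))) (out : Int) : Prop := out = calculate_outfit_potential_py_alt gap owned_items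
instance (gap : List (String × String)) (owned_items : List (List (String × String))) (out : Int) : Decidable (Spec_calculate_outfit_potential_py gap owned_items out) := by unfold Spec_calculate_outfit_potential_py; infer_instance

-- ===== CLAIM (what is proved, stated in full; the proofs are below) =====
def Claim_equal_calculate_outfit_potential_py : Prop := ∀ (gap : List (String × String)) (owned_items : List (List (String × String))), Dom_calculate_outfit_potential_py gap owned_items → Spec_calculate_outfit_potential_py gap owned_items (calculate_outfit_potential_py gap owned_items)

-- ===== LEMMAS AND PROOFS =====

-- B's counting loop seen at one key = A's filtered-length for that key
lemma counts_getD (owned_items : List (List (String × String))) (c : String) :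
    (owned_items.foldl (fun d i => d.insert (pyCat i) (d.getD (pyCat i) 0 + 1))
      (PySem.Dict.empty : PySem.Dict (Option String) Int)).getD (some c) 0
    = ((owned_items.filter (fun i => pyCat i == some c)).length : Int) := by
  have h : owned_items.foldl (fun d i => d.insert (pyCat i) (d.getD (pyCat i) 0 + 1))
      (PySem.Dict.empty : PySem.Dict (Option String) Int)
      = (owned_items.map pyCat).foldl (fun d x => d.insert x (d.getD x 0 + 1)) PySem.Dict.empty := by
    rw [List.foldl_map]
  rw [h, PySem.Dict.getD_foldl_insert_add_one, PySem.Dict.getD_empty]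
  rw [List.count_eq_countP, List.countP_map]
  simp only [List.countP_eq_length_filter, zero_add]
  congr 1

-- the dispatch table looked up at an arbitrary key
lemma table_getD (v1 v2 v3 v4 : Int) (cat : List Char) :
    (PySem.Dict.ofList [("top".toList, v1), ("bottom".toList, v2), ("footwear".toList, v3), ("outerwear".toList, v4)]).getD cat 5
    = if cat = "outerwear".toList then v4 else if cat = "footwear".toList then v3
      else if cat = "bottom".toList then v2 else if cat = "top".toList then v1 else 5 := by
  have h : (PySem.Dict.ofList [("top".toList, v1), ("bottom".toList, v2), ("footwear".toList, v3), ("outerwear".toList, v4)])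
      = ((((PySem.Dict.empty.insert "top".toList v1).insert "bottom".toList v2).insert "footwear".toList v3).insert "outerwear".toList v4) := by
    rfl
  rw [h]
  simp [PySem.Dict.getD_insert, PySem.Dict.getD_empty]
  split_ifs <;> rfl

-- ===== VERDICT (by name: the statement is the Claim_ definition above) =====
theorem calculate_outfit_potential_py_spec : Claim_equal_calculate_outfit_potential_py := by
  intro gap owned_items _
  unfold Spec_calculate_outfit_potential_py calculate_outfit_potential_py calculate_outfit_potential_py_alt
  simp only [counts_getD, table_getD]
  by_cases h0 : pyRstripS ((PySem.Dict.ofList gap).getD "category" "") = []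
  · simp [h0]
  · simp only [if_neg h0]
    split_ifs <;> simp_all
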